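-- pv_equiv track=rewrite | github.com/gertjanbron/zornq | code/treewidth_solver.py | build_elimination_tree
-- ===== SOURCE A (Python) =====
-- from collections import defaultdict
--
-- def build_elimination_tree(ordering, bags):
--     """Bouw boomstructuur uit eliminatie-ordering."""
--     n_bags = len(bags)
--     elim_bag = {}
--     for i, v in enumerate(ordering):
--         elim_bag[v] = i
--
--     children = defaultdict(list)
--     root = n_bags - 1
--     has_parent = set()
--
--     for i in range(n_bags):
--         best_parent = None
--         for v in bags[i]:
--             if v != ordering[i] and v in elim_bag:
--                 j = elim_bag[v]
--                 if j > i and (best_parent is None or j < best_parent):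
--                     best_parent = j
--         if best_parent is not None:
--             children[best_parent].append(i)
--             has_parent.add(i)
--
--     for i in range(n_bags):
--         if i != root and i not in has_parent:
--             children[root].append(i)
--
--     return children, root
-- ===== SOURCE B (Python) =====
-- from collections import defaultdict
--
-- def build_elimination_tree(ordering, bags):
--     """Bouw boomstructuur uit eliminatie-ordering (event-driven sweep over the ordering)."""
--     n_bags = len(bags)
--     n = len(ordering)
--     last = {}
--     for i, v in enumerate(ordering):
--         last[v] = i
--
--     # incidence index: vertex -> bags containing it
--     holders = defaultdict(list)
--     for i in range(n_bags):
--         for v in set(bags[i]):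
--             holders[v].append(i)
--
--     # ascending sweep over elimination positions: position j adopts every still
--     # unattached earlier bag holding the vertex that is (last) eliminated at j
--     parent = [None] * n_bags
--     for j in range(n):
--         w = ordering[j]
--         if last[w] == j:
--             for i in holders[w]:
--                 if i < j and parent[i] is None and w != ordering[i]:
--                     parent[i] = j
--
--     children = defaultdict(list)
--     root = n_bags - 1
--     for i in range(n_bags):
--         if parent[i] is not None:
--             children[parent[i]].append(i)
--     for i in range(n_bags):
--         if parent[i] is None and i != root:
--             children[root].append(i)
--     return children, root
-- ===== Notes on version B (the rewrite author's own statement) =====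
-- stated objective: alternative
-- what changed: B inverts the traversal: instead of A's per-bag running-min over elimination indices plus a has_parent set and orphan sweep, it builds a vertex-to-bags incidence dict once, then makes one ascending event-driven pass over the elimination positions in which each position adopts every still-unattached earlier bag holding its (last-eliminated) vertex, filling a parent array that two plain passes turn into the children dict.
import Mathlib
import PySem

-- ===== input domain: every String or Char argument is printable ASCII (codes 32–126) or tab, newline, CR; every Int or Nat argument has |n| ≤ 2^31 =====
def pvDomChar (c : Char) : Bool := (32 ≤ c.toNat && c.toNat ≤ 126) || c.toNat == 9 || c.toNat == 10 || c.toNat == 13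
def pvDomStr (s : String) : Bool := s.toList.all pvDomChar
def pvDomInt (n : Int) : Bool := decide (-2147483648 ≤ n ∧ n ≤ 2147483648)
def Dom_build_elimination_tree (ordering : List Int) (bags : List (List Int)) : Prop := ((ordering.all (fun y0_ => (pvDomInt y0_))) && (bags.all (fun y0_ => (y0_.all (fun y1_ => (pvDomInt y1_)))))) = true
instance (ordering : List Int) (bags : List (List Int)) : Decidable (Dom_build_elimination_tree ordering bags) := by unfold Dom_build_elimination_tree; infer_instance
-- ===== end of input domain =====

-- B replaces A's per-bag running-min over elimination indices by an event-driven sweep: a vertex->bags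
-- incidence dict is built once, then one ascending pass over the elimination positions attaches each still
-- unattached earlier bag to the current position, filling a parent array read out afterwards (objective: alternative).

-- ===== PORT A =====
-- elim_bag = {}; for i, v in enumerate(ordering): elim_bag[v] = i
def pvElimBag (ordering : List Int) : PySem.Dict Int Int :=
  (PySem.List.enumerate ordering).foldl (fun d p => d.insert p.2 p.1) PySem.Dict.empty

-- A's inner running-min step over one bag ('j = elim_bag[v]' only reached under the 'v in elim_bag' guard)
def pvStepA (elim : PySem.Dict Int Int) (oi i : Int) (best : Option Int) (v : Int) : Option Int :=
  if v ≠ oi ∧ elim.contains v = true then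
    match elim.get? v with
    | some j =>
      match best with
      | none => if j > i then some j else none
      | some b => if j > i ∧ j < b then some j else some b
    | none => best
  else best

def build_elimination_tree (ordering : List Int) (bags : List (List Int)) : (List (Int × List Int)) × Int :=
  let n_bags : Int := (bags.length : Int)
  let elim := pvElimBag ordering
  let root : Int := n_bags - 1
  -- for i in range(n_bags): best_parent := running min over bags[i]; then append + record
  let st := (PySem.List.pyRange 0 n_bags 1).foldl
    (fun (st : PySem.Dict Int (List Int) × PySem.Set Int) i =>
      let best := (PySem.List.pyGetD bags i []).foldl
        (pvStepA elim (PySem.List.pyGetD ordering i 0) i) none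
      match best with
      | some bp => (st.1.modify bp [] (· ++ [i]), PySem.Set.add st.2 i)
      | none => st)
    (PySem.Dict.empty, PySem.Set.empty)
  -- orphan sweep: for i in range(n_bags): if i != root and i not in has_parent: children[root].append(i)
  let children := (PySem.List.pyRange 0 n_bags 1).foldl
    (fun ch i =>
      if i ≠ root ∧ ¬ (PySem.Set.contains st.2 i = true) then ch.modify root [] (· ++ [i]) else ch)
    st.1
  (children.items, root)

-- ===== PORT B =====
-- holders = defaultdict(list); for i in range(n_bags): for v in set(bags[i]): holders[v].append(i)
def pvHolders (bags : List (List Int)) : PySem.Dict Int (List Int) :=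
  (PySem.List.pyRange 0 ((bags.length : Int)) 1).foldl
    (fun h i => (PySem.Set.ofList (PySem.List.pyGetD bags i [])).foldl
      (fun h v => h.modify v [] (· ++ [i])) h)
    PySem.Dict.empty

-- 'if i < j and parent[i] is None and w != ordering[i]: parent[i] = j'
def pvAdoptStep (ordering : List Int) (w j : Int) (par : List (Option Int)) (i : Int) : List (Option Int) :=
  if i < j ∧ PySem.List.pyGetD par i none = none ∧ w ≠ PySem.List.pyGetD ordering i 0
  then par.set i.toNat (some j) else par

-- one position of the sweep: 'w = ordering[j]; if last[w] == j: for i in holders[w]: …' (w written out)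
def pvSweepB (ordering : List Int) (last : PySem.Dict Int Int) (holders : PySem.Dict Int (List Int))
    (par : List (Option Int)) (j : Int) : List (Option Int) :=
  if last.get? (PySem.List.pyGetD ordering j 0) == some j
  then (holders.getD (PySem.List.pyGetD ordering j 0) []).foldl
    (pvAdoptStep ordering (PySem.List.pyGetD ordering j 0) j) par
  else par

def build_elimination_tree_alt (ordering : List Int) (bags : List (List Int)) : (List (Int × List Int)) × Int :=
  let n_bags : Int := (bags.length : Int)
  let n : Int := (ordering.length : Int)
  let last := pvElimBag ordering
  let holders := pvHolders bags
  -- parent = [None] * n_bags; for j in range(n): (sweep)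
  let parent := (PySem.List.pyRange 0 n 1).foldl (pvSweepB ordering last holders)
      (List.replicate bags.length (none : Option Int))
  let root : Int := n_bags - 1
  -- for i in range(n_bags): if parent[i] is not None: children[parent[i]].append(i)
  let ch1 := (PySem.List.pyRange 0 n_bags 1).foldl
    (fun ch i => match PySem.List.pyGetD parent i none with
      | some q => ch.modify q [] (· ++ [i])
      | none => ch) PySem.Dict.empty
  -- for i in range(n_bags): if parent[i] is None and i != root: children[root].append(i)
  let children := (PySem.List.pyRange 0 n_bags 1).foldl
    (fun ch i => if PySem.List.pyGetD parent i none = none ∧ i ≠ root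
      then ch.modify root [] (· ++ [i]) else ch) ch1
  (children.items, root)

-- ===== PRECONDITION & SPEC =====
-- Pre_ excludes exactly the inputs where Python A raises IndexError: a nonempty bag at index i with i ≥ len(ordering) reads ordering[i].
def Pre_build_elimination_tree (ordering : List Int) (bags : List (List Int)) : Prop :=
  ∀ i ∈ List.range bags.length, bags.getD i [] = [] ∨ i < ordering.length
instance (ordering : List Int) (bags : List (List Int)) : Decidable (Pre_build_elimination_tree ordering bags) := by unfold Pre_build_elimination_tree; infer_instance

def pvWitness_build_elimination_tree : List Int × List (List Int) := ([0, 1, 2], [[0, 1], [1, 2], [2]])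

def Spec_build_elimination_tree (ordering : List Int) (bags : List (List Int)) (out : (List (Int × List Int)) × Int) : Prop := out = build_elimination_tree_alt ordering bags
instance (ordering : List Int) (bags : List (List Int)) (out : (List (Int × List Int)) × Int) : Decidable (Spec_build_elimination_tree ordering bags out) := by unfold Spec_build_elimination_tree; infer_instance

-- ===== CLAIM (what is proved, stated in full; the proofs are below) =====
def Claim_equal_build_elimination_tree : Prop := ∀ (ordering : List Int) (bags : List (List Int)), Dom_build_elimination_tree ordering bags → Pre_build_elimination_tree ordering bags → Spec_build_elimination_tree ordering bags (build_elimination_tree ordering bags)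

-- ===== LEMMAS AND PROOFS =====

-- the candidate elim indices of one bag, and the parent as their minimum (the common normal form)
def pvCandB (elim : PySem.Dict Int Int) (oi i : Int) (v : Int) : Option Int :=
  match elim.get? v with
  | some j => if v ≠ oi ∧ j > i then some j else none
  | none => none

def pvParent (ordering : List Int) (bags : List (List Int)) (i : Int) : Option Int :=
  PySem.List.min?
    ((PySem.List.pyGetD bags i []).filterMap
      (pvCandB (pvElimBag ordering) (PySem.List.pyGetD ordering i 0) i)) (fun x => x)

-- option-min combine (right operand wins when the left is none)
def pvComb (b m : Option Int) : Option Int :=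
  match b, m with
  | none, m => m
  | some b, none => some b
  | some b, some m => some (if m < b then m else b)

def pvBuildStep (ordering : List Int) (bags : List (List Int))
    (ch : PySem.Dict Int (List Int)) (i : Int) : PySem.Dict Int (List Int) :=
  match pvParent ordering bags i with
  | some q => ch.modify q [] (· ++ [i])
  | none => ch

def pvHasStep (ordering : List Int) (bags : List (List Int))
    (s : PySem.Set Int) (i : Int) : PySem.Set Int :=
  match pvParent ordering bags i with
  | some _ => PySem.Set.add s i
  | none => s

def pvSweepStep (ordering : List Int) (bags : List (List Int)) (root : Int)
    (ch : PySem.Dict Int (List Int)) (i : Int) : PySem.Dict Int (List Int) :=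
  match pvParent ordering bags i with
  | none => if i ≠ root then ch.modify root [] (· ++ [i]) else ch
  | some _ => ch

theorem pv_foldl_min_comm (t : List Int) : ∀ a b : Int, min a (t.foldl min b) = t.foldl min (min a b) := by
  induction t with
  | nil => intro a b; rfl
  | cons c t ih =>
    intro a b
    simp only [List.foldl_cons]
    rw [ih a (min b c), min_assoc]

theorem pv_if_lt_min (m b : Int) : (if m < b then m else b) = min m b := by
  rcases lt_trichotomy m b with h | h | h <;> simp [min_def] <;> omega

theorem pv_comb_some_min? (cs : List Int) (b : Int) :
    pvComb (some b) (PySem.List.min? cs (fun x => x)) = some (cs.foldl min b) := by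
  cases cs with
  | nil => rfl
  | cons c t =>
    rw [PySem.List.min?_id_cons]
    show some (if t.foldl min c < b then t.foldl min c else b) = _
    rw [pv_if_lt_min, min_comm, pv_foldl_min_comm t b c, List.foldl_cons]

theorem pv_comb_step (best : Option Int) (j : Int) (cs : List Int) :
    pvComb (pvComb best (some j)) (PySem.List.min? cs (fun x => x))
      = pvComb best (PySem.List.min? (j :: cs) (fun x => x)) := by
  cases best with
  | none =>
    show pvComb (some j) _ = PySem.List.min? (j :: cs) (fun x => x)
    rw [pv_comb_some_min?, PySem.List.min?_id_cons]
  | some b =>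
    show pvComb (some (if j < b then j else b)) _ = _
    rw [pv_comb_some_min?, PySem.List.min?_id_cons]
    show _ = some (if cs.foldl min j < b then cs.foldl min j else b)
    rw [pv_if_lt_min, pv_if_lt_min, min_comm j b, ← pv_foldl_min_comm cs b j, min_comm b (cs.foldl min j)]

theorem pv_stepA_eq_comb (elim : PySem.Dict Int Int) (oi i : Int) (bag : List Int) :
    ∀ best : Option Int,
      bag.foldl (pvStepA elim oi i) best
        = pvComb best (PySem.List.min? (bag.filterMap (pvCandB elim oi i)) (fun x => x)) := by
  induction bag with
  | nil => intro best; cases best <;> rfl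
  | cons v rest ih =>
    intro best
    simp only [List.foldl_cons, List.filterMap_cons]
    rcases hg : elim.get? v with _ | j
    · have hcf : elim.contains v = false := by
        rw [PySem.Dict.contains_eq_isSome_get?, hg]; rfl
      have hc : pvCandB elim oi i v = none := by unfold pvCandB; rw [hg]
      have hstep : pvStepA elim oi i best v = best := by
        unfold pvStepA
        rw [if_neg (by intro h; rw [hcf] at h; exact Bool.noConfusion h.2)]
      rw [hc, hstep, ih]
    · have hct : elim.contains v = true := by
        rw [PySem.Dict.contains_eq_isSome_get?, hg]; rfl
      by_cases hvo : v = oi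
      · have hc : pvCandB elim oi i v = none := by
          unfold pvCandB; rw [hg]
          show (if v ≠ oi ∧ j > i then some j else none) = none
          rw [if_neg (fun h => h.1 hvo)]
        have hstep : pvStepA elim oi i best v = best := by
          unfold pvStepA
          rw [if_neg (fun h => h.1 hvo)]
        rw [hc, hstep, ih]
      · by_cases hji : j > i
        · have hc : pvCandB elim oi i v = some j := by
            unfold pvCandB; rw [hg]
            show (if v ≠ oi ∧ j > i then some j else none) = some j
            rw [if_pos ⟨hvo, hji⟩]
          have hstep : pvStepA elim oi i best v = pvComb best (some j) := by
            unfold pvStepA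
            rw [if_pos ⟨hvo, hct⟩, hg]
            cases best with
            | none =>
              show (if j > i then some j else none) = pvComb none (some j)
              rw [if_pos hji]; rfl
            | some b =>
              show (if j > i ∧ j < b then some j else some b) = pvComb (some b) (some j)
              show _ = some (if j < b then j else b)
              by_cases hlt : j < b
              · rw [if_pos ⟨hji, hlt⟩, if_pos hlt]
              · rw [if_neg (fun h => hlt h.2), if_neg hlt]
          rw [hc, hstep, ih]
          show pvComb (pvComb best (some j)) _
            = pvComb best (PySem.List.min? (j :: rest.filterMap (pvCandB elim oi i)) (fun x => x))
          rw [pv_comb_step]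
        · have hc : pvCandB elim oi i v = none := by
            unfold pvCandB; rw [hg]
            show (if v ≠ oi ∧ j > i then some j else none) = none
            rw [if_neg (fun h => hji h.2)]
          have hstep : pvStepA elim oi i best v = best := by
            unfold pvStepA
            rw [if_pos ⟨hvo, hct⟩, hg]
            cases best with
            | none =>
              show (if j > i then some j else none) = none
              rw [if_neg hji]
            | some b =>
              show (if j > i ∧ j < b then some j else some b) = some b
              rw [if_neg (fun h => hji h.1)]
          rw [hc, hstep, ih]

theorem pv_bestfold_eq (ordering : List Int) (bags : List (List Int)) (i : Int) :
    (PySem.List.pyGetD bags i []).foldl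
        (pvStepA (pvElimBag ordering) (PySem.List.pyGetD ordering i 0) i) none
      = pvParent ordering bags i := by
  rw [pv_stepA_eq_comb]; rfl

-- membership in a conditional-add set fold
theorem pv_mem_foldl_add (q : Int → Bool) (l : List Int) :
    ∀ (s : PySem.Set Int) (x : Int),
      (x ∈ l.foldl (fun s i => if q i then PySem.Set.add s i else s) s) ↔ x ∈ s ∨ (x ∈ l ∧ q x = true) := by
  induction l with
  | nil => intro s x; simp
  | cons b t ih =>
    intro s x
    simp only [List.foldl_cons]
    by_cases hq : q b = true
    · rw [if_pos hq, ih]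
      rw [PySem.Set.mem_add]
      constructor
      · rintro (⟨hs | hxb⟩ | ⟨hxt, hqx⟩)
        · exact Or.inl hs
        · exact Or.inr ⟨by simp [hxb], hxb ▸ hq⟩
        · exact Or.inr ⟨List.mem_cons_of_mem _ hxt, hqx⟩
      · rintro (hs | ⟨hxm, hqx⟩)
        · exact Or.inl (Or.inl hs)
        · rcases List.mem_cons.mp hxm with h | h
          · exact Or.inl (Or.inr h)
          · exact Or.inr ⟨h, hqx⟩
    · rw [if_neg hq, ih]
      constructor
      · rintro (hs | ⟨hxt, hqx⟩)
        · exact Or.inl hs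
        · exact Or.inr ⟨List.mem_cons_of_mem _ hxt, hqx⟩
      · rintro (hs | ⟨hxm, hqx⟩)
        · exact Or.inl hs
        · rcases List.mem_cons.mp hxm with h | h
          · exact absurd (h ▸ hqx) hq
          · exact Or.inr ⟨h, hqx⟩

-- A's first loop splits into the children fold and the has_parent fold
theorem pv_fold1_eq (ordering : List Int) (bags : List (List Int)) (l : List Int) :
    ∀ st0 : PySem.Dict Int (List Int) × PySem.Set Int,
      l.foldl (fun st i =>
          match (PySem.List.pyGetD bags i []).foldl
              (pvStepA (pvElimBag ordering) (PySem.List.pyGetD ordering i 0) i) none with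
          | some bp => (st.1.modify bp [] (· ++ [i]), PySem.Set.add st.2 i)
          | none => st) st0
        = (l.foldl (pvBuildStep ordering bags) st0.1, l.foldl (pvHasStep ordering bags) st0.2) := by
  induction l with
  | nil => intro st0; rfl
  | cons i t ih =>
    intro st0
    simp only [List.foldl_cons]
    rw [pv_bestfold_eq, ih]
    rcases hP : pvParent ordering bags i with _ | bp <;>
      simp [pvBuildStep, pvHasStep, hP]

theorem pv_A_norm (ordering : List Int) (bags : List (List Int)) :
    build_elimination_tree ordering bags =
      (((PySem.List.pyRange 0 ((bags.length : Int)) 1).foldl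
          (pvSweepStep ordering bags ((bags.length : Int) - 1))
          ((PySem.List.pyRange 0 ((bags.length : Int)) 1).foldl (pvBuildStep ordering bags) PySem.Dict.empty)).items,
        (bags.length : Int) - 1) := by
  simp only [build_elimination_tree]
  rw [pv_fold1_eq]
  have hS : ∀ x : Int,
      (PySem.Set.contains
          ((PySem.List.pyRange 0 ((bags.length : Int)) 1).foldl (pvHasStep ordering bags) PySem.Set.empty) x = true)
        ↔ (x ∈ PySem.List.pyRange 0 ((bags.length : Int)) 1 ∧ (pvParent ordering bags x).isSome = true) := by
    intro x
    have h1 : (PySem.List.pyRange 0 ((bags.length : Int)) 1).foldl (pvHasStep ordering bags) PySem.Set.empty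
        = (PySem.List.pyRange 0 ((bags.length : Int)) 1).foldl
            (fun s i => if (pvParent ordering bags i).isSome then PySem.Set.add s i else s) PySem.Set.empty := by
      apply PySem.List.foldl_congr_mem
      intro s i _
      unfold pvHasStep
      rcases pvParent ordering bags i <;> simp
    rw [h1, PySem.Set.contains_iff, pv_mem_foldl_add]
    simp [PySem.Set.empty]
  refine congrArg (fun d => (PySem.Dict.items d, (bags.length : Int) - 1)) ?_
  apply PySem.List.foldl_congr_mem
  intro acc i hi
  rcases hP : pvParent ordering bags i with _ | q
  · simp only [pvSweepStep, hP]
    by_cases hir : i = (bags.length : Int) - 1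
    · rw [if_neg (fun h => h.1 hir), if_neg (fun h => h hir)]
    · have hc : ¬ (PySem.Set.contains
          ((PySem.List.pyRange 0 ((bags.length : Int)) 1).foldl (pvHasStep ordering bags) PySem.Set.empty) i = true) := by
        rw [hS]
        rintro ⟨_, hsome⟩
        rw [hP] at hsome
        exact Bool.noConfusion hsome
      rw [if_pos ⟨hir, hc⟩, if_pos hir]
  · simp only [pvSweepStep, hP]
    have hc : PySem.Set.contains
        ((PySem.List.pyRange 0 ((bags.length : Int)) 1).foldl (pvHasStep ordering bags) PySem.Set.empty) i = true :=
      (hS i).mpr ⟨hi, by rw [hP]; rfl⟩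
    rw [if_neg (fun h => h.2 hc)]

-- ---- B side: the sweep fills the parent array with the same parents ----

-- B's sweep attaches bag x at position j exactly when this test holds (the common scan predicate)
def pvScanPred (last : PySem.Dict Int Int) (members : PySem.Set Int) (oi : Int) (ordering : List Int) (j : Int) : Bool :=
  let w := PySem.List.pyGetD ordering j 0
  (last.get? w == some j) && PySem.Set.contains members w && (w != oi)

-- elim_bag's entries really point back into the ordering
theorem pv_elimBag_get (ordering : List Int) (v j : Int)
    (h : (pvElimBag ordering).get? v = some j) :
    ∃ k : Nat, j = (k : Int) ∧ ordering[k]? = some v := by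
  induction ordering using List.reverseRecOn with
  | nil => simp [pvElimBag, PySem.List.enumerate_nil, PySem.Dict.get?_empty] at h
  | append_singleton l x ih =>
    have hsplit : pvElimBag (l ++ [x]) = (pvElimBag l).insert x (l.length : Int) := by
      unfold pvElimBag
      rw [PySem.List.enumerate_append, List.foldl_append]
      simp [PySem.List.enumerate_cons, PySem.List.enumerate_nil]
    rw [hsplit, PySem.Dict.get?_insert] at h
    by_cases hvx : v = x
    · rw [if_pos hvx] at h
      refine ⟨l.length, by exact_mod_cast (Option.some.inj h).symm, ?_⟩
      rw [List.getElem?_append_right (le_refl _)]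
      simp [hvx]
    · rw [if_neg hvx] at h
      obtain ⟨k, hk, hget⟩ := ih h
      have hlt : k < l.length := (List.getElem?_eq_some_iff.mp hget).1
      exact ⟨k, hk, by rw [List.getElem?_append_left hlt]; exact hget⟩

-- find? over an increasing integer range: the first hit
theorem pv_find_range_some (P : Int → Bool) (n : Nat) : ∀ (a b : Int), (b - a).toNat = n →
    ∀ j, (PySem.List.pyRange a b 1).find? P = some j →
      a ≤ j ∧ j < b ∧ P j = true ∧ ∀ k, a ≤ k → k < j → P k = false := by
  induction n with
  | zero =>
    intro a b hn j hf
    rw [PySem.List.pyRange_one_eq_nil (by omega)] at hf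
    exact absurd hf (by simp)
  | succ n ih =>
    intro a b hn j hf
    have hab : a < b := by omega
    rw [PySem.List.pyRange_one_cons hab, List.find?_cons] at hf
    rcases hPa : P a with _ | _
    · rw [hPa] at hf
      obtain ⟨h1, h2, h3, h4⟩ := ih (a + 1) b (by omega) j hf
      refine ⟨by omega, h2, h3, fun k hk1 hk2 => ?_⟩
      rcases eq_or_lt_of_le hk1 with h | h
      · rw [← h]; exact hPa
      · exact h4 k (by omega) hk2
    · rw [hPa] at hf
      have hj : j = a := (Option.some.inj hf).symm
      exact ⟨le_of_eq hj.symm, by omega, hj ▸ hPa, fun k hk1 hk2 => by omega⟩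

theorem pv_find_range_none (P : Int → Bool) (a b : Int)
    (h : (PySem.List.pyRange a b 1).find? P = none) :
    ∀ j, a ≤ j → j < b → P j = false := by
  intro j h1 h2
  have := List.find?_eq_none.mp h
  have hm : j ∈ PySem.List.pyRange a b 1 := PySem.List.mem_pyRange_one.mpr ⟨h1, h2⟩
  exact Bool.not_eq_true _ ▸ (by simpa using this j hm)

-- the candidates of bag i are exactly the scan hits
theorem pv_mem_cand (ordering bag : List Int) (oi i j : Int) :
    j ∈ bag.filterMap (pvCandB (pvElimBag ordering) oi i) ↔
      (i < j ∧ j < (ordering.length : Int) ∧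
        pvScanPred (pvElimBag ordering) (PySem.Set.ofList bag) oi ordering j = true) := by
  constructor
  · intro hmem
    obtain ⟨v, hv, hc⟩ := List.mem_filterMap.mp hmem
    unfold pvCandB at hc
    rcases hg : (pvElimBag ordering).get? v with _ | j'
    · rw [hg] at hc; exact absurd hc (by simp)
    · rw [hg] at hc
      have hc' : (if v ≠ oi ∧ j' > i then some j' else none) = some j := hc
      by_cases hcond : v ≠ oi ∧ j' > i
      · rw [if_pos hcond] at hc'
        have hj : j' = j := Option.some.inj hc'
        subst hj
        obtain ⟨k, hk, hget⟩ := pv_elimBag_get ordering v j' hg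
        have hklen : k < ordering.length := (List.getElem?_eq_some_iff.mp hget).1
        have hjlen : j' < (ordering.length : Int) := by omega
        have hw : PySem.List.pyGetD ordering j' 0 = v := by
          rw [PySem.List.pyGetD_eq_getElem ordering 0 (by omega) hjlen]
          have h5 := (List.getElem?_eq_some_iff.mp hget).2
          subst hk
          simpa using h5
        refine ⟨hcond.2, hjlen, ?_⟩
        unfold pvScanPred
        simp only [hw, hg]
        simp [(PySem.Set.mem_ofList bag v).mpr hv, hcond.1]
      · rw [if_neg hcond] at hc'; exact absurd hc' (by simp)
  · rintro ⟨hij, hjn, hP⟩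
    unfold pvScanPred at hP
    simp only [Bool.and_eq_true, beq_iff_eq, bne_iff_ne] at hP
    obtain ⟨⟨hg, hmem⟩, hne⟩ := hP
    refine List.mem_filterMap.mpr ⟨PySem.List.pyGetD ordering j 0, ?_, ?_⟩
    · exact (PySem.Set.mem_ofList _ _).mp ((PySem.Set.contains_iff _ _).mp hmem)
    · show pvCandB (pvElimBag ordering) oi i (PySem.List.pyGetD ordering j 0) = some j
      unfold pvCandB
      rw [hg]
      exact if_pos ⟨hne, hij⟩

-- the forward scan = the min of the candidates
theorem pv_scan_eq_parent (ordering : List Int) (bags : List (List Int)) (i : Int) :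
    (PySem.List.pyRange (i + 1) ((ordering.length : Int)) 1).find?
        (pvScanPred (pvElimBag ordering) (PySem.Set.ofList (PySem.List.pyGetD bags i []))
          (PySem.List.pyGetD ordering i 0) ordering)
      = pvParent ordering bags i := by
  unfold pvParent
  rcases hF : (PySem.List.pyRange (i + 1) ((ordering.length : Int)) 1).find?
      (pvScanPred (pvElimBag ordering) (PySem.Set.ofList (PySem.List.pyGetD bags i []))
        (PySem.List.pyGetD ordering i 0) ordering) with _ | j
  · symm
    rw [PySem.List.min?_eq_none_iff]
    rw [List.eq_nil_iff_forall_not_mem]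
    intro j hj
    obtain ⟨h1, h2, h3⟩ := (pv_mem_cand ordering _ _ i j).mp hj
    have := pv_find_range_none _ _ _ hF j (by omega) h2
    rw [h3] at this
    exact Bool.noConfusion this
  · obtain ⟨h1, h2, h3, h4⟩ :=
      pv_find_range_some _ ((((ordering.length : Int)) - (i + 1)).toNat) (i + 1)
        ((ordering.length : Int)) rfl j hF
    have hjmem := (pv_mem_cand ordering _ _ i j).mpr ⟨by omega, h2, h3⟩
    rcases hm : PySem.List.min?
        ((PySem.List.pyGetD bags i []).filterMap
          (pvCandB (pvElimBag ordering) (PySem.List.pyGetD ordering i 0) i)) (fun x => x) with _ | m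
    · rw [PySem.List.min?_eq_none_iff] at hm
      rw [hm] at hjmem
      exact absurd hjmem (by simp)
    · have hmmem := PySem.List.min?_mem hm
      obtain ⟨hm1, hm2, hm3⟩ := (pv_mem_cand ordering _ _ i m).mp hmmem
      have hmj : m ≤ j := PySem.List.min?_isMin hm j hjmem
      have hjm : ¬ m < j := by
        intro hlt
        have := h4 m (by omega) hlt
        rw [hm3] at this
        exact Bool.noConfusion this
      have : m = j := by omega
      rw [this]

-- lengths are preserved through the sweep
theorem pv_adoptfold_length (ordering : List Int) (w j : Int) (is : List Int) :
    ∀ par : List (Option Int), (is.foldl (pvAdoptStep ordering w j) par).length = par.length := by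
  induction is with
  | nil => intro par; rfl
  | cons i t ih =>
    intro par
    simp only [List.foldl_cons, ih]
    unfold pvAdoptStep
    split <;> simp

theorem pv_sweepfold_length (ordering : List Int) (last : PySem.Dict Int Int)
    (holders : PySem.Dict Int (List Int)) (l : List Int) :
    ∀ par : List (Option Int), (l.foldl (pvSweepB ordering last holders) par).length = par.length := by
  induction l with
  | nil => intro par; rfl
  | cons j t ih =>
    intro par
    simp only [List.foldl_cons, ih]
    unfold pvSweepB
    split
    · exact pv_adoptfold_length ordering _ j _ par
    · rfl

-- what holders[w] holds: exactly the (ascending, distinct) indices of the bags containing w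
theorem pv_modifyfold_getD_of_not_mem (i w : Int) (vs : List Int) (hw : w ∉ vs) :
    ∀ d : PySem.Dict Int (List Int),
      (vs.foldl (fun h v => h.modify v [] (· ++ [i])) d).getD w [] = d.getD w [] := by
  induction vs with
  | nil => intro d; rfl
  | cons v t ih =>
    intro d
    simp only [List.foldl_cons]
    rw [ih (fun h => hw (List.mem_cons_of_mem _ h))]
    exact PySem.Dict.getD_modify_of_ne d [] _ (fun h => hw (h ▸ List.mem_cons_self ..))
  
theorem pv_modifyfold_getD (i w : Int) (vs : List Int) (hnd : vs.Nodup) :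
    ∀ d : PySem.Dict Int (List Int),
      (vs.foldl (fun h v => h.modify v [] (· ++ [i])) d).getD w []
        = d.getD w [] ++ (if w ∈ vs then [i] else []) := by
  induction vs with
  | nil => intro d; simp
  | cons v t ih =>
    intro d
    simp only [List.foldl_cons]
    by_cases hwv : w = v
    · subst hwv
      have hwt : w ∉ t := (List.nodup_cons.mp hnd).1
      rw [pv_modifyfold_getD_of_not_mem i w t hwt, PySem.Dict.getD_modify_self]
      simp
    · rw [ih (List.nodup_cons.mp hnd).2, PySem.Dict.getD_modify_of_ne d [] _ hwv]
      simp [hwv]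

theorem pv_holdersfold_getD (bags : List (List Int)) (w : Int) (l : List Int) :
    ∀ d : PySem.Dict Int (List Int),
      (l.foldl (fun h i => (PySem.Set.ofList (PySem.List.pyGetD bags i [])).foldl
          (fun h v => h.modify v [] (· ++ [i])) h) d).getD w []
        = d.getD w [] ++ l.filter (fun i => PySem.Set.contains (PySem.Set.ofList (PySem.List.pyGetD bags i [])) w) := by
  induction l with
  | nil => intro d; simp
  | cons i t ih =>
    intro d
    simp only [List.foldl_cons]
    rw [ih, pv_modifyfold_getD i w _ (PySem.Set.nodup_ofList _), List.filter_cons]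
    by_cases hc : w ∈ PySem.Set.ofList (PySem.List.pyGetD bags i [])
    · rw [if_pos hc, if_pos (by exact (PySem.Set.contains_iff _ _).mpr hc)]
      simp
    · rw [if_neg hc, if_neg (by intro h; exact hc ((PySem.Set.contains_iff _ _).mp h))]
      simp

theorem pv_holders_getD (bags : List (List Int)) (w : Int) :
    (pvHolders bags).getD w []
      = (PySem.List.pyRange 0 ((bags.length : Int)) 1).filter
          (fun i => PySem.Set.contains (PySem.Set.ofList (PySem.List.pyGetD bags i [])) w) := by
  unfold pvHolders
  rw [pv_holdersfold_getD]
  simp [PySem.Dict.getD_empty]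

theorem pv_mem_holders (bags : List (List Int)) (w x : Int) :
    x ∈ (pvHolders bags).getD w []
      ↔ (0 ≤ x ∧ x < (bags.length : Int) ∧ w ∈ PySem.List.pyGetD bags x []) := by
  rw [pv_holders_getD, List.mem_filter, PySem.List.mem_pyRange_one]
  constructor
  · rintro ⟨⟨h1, h2⟩, h3⟩
    exact ⟨h1, h2, (PySem.Set.mem_ofList _ _).mp ((PySem.Set.contains_iff _ _).mp h3)⟩
  · rintro ⟨h1, h2, h3⟩
    exact ⟨⟨h1, h2⟩, (PySem.Set.contains_iff _ _).mpr ((PySem.Set.mem_ofList _ _).mpr h3)⟩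

theorem pv_nodup_holders (bags : List (List Int)) (w : Int) :
    ((pvHolders bags).getD w []).Nodup := by
  rw [pv_holders_getD]
  exact List.Nodup.filter _ (PySem.List.nodup_pyRange_one 0 ((bags.length : Int)))

-- value of the parent array after one adoption pass
theorem pv_adoptfold_getD (ordering : List Int) (w j : Int) (is : List Int)
    (hnd : is.Nodup) (hpos : ∀ i ∈ is, 0 ≤ i) :
    ∀ (par : List (Option Int)) (x : Int), 0 ≤ x → x < (par.length : Int) →
      PySem.List.pyGetD (is.foldl (pvAdoptStep ordering w j) par) x none
        = if x ∈ is ∧ x < j ∧ PySem.List.pyGetD par x none = none ∧ w ≠ PySem.List.pyGetD ordering x 0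
          then some j else PySem.List.pyGetD par x none := by
  induction is with
  | nil => intro par x h0 hl; simp
  | cons i t ih =>
    intro par x h0 hl
    simp only [List.foldl_cons]
    have hlen' : (pvAdoptStep ordering w j par i).length = par.length := by
      unfold pvAdoptStep; split <;> simp
    by_cases hxi : x = i
    · subst hxi
      have hxt : x ∉ t := (List.nodup_cons.mp hnd).1
      by_cases hc : x < j ∧ PySem.List.pyGetD par x none = none ∧ w ≠ PySem.List.pyGetD ordering x 0
      · have hstep : pvAdoptStep ordering w j par x = par.set x.toNat (some j) := by
          unfold pvAdoptStep; rw [if_pos hc]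
        rw [ih (List.nodup_cons.mp hnd).2 (fun i hi => hpos i (List.mem_cons_of_mem _ hi)) _ x h0 (by rw [hlen']; exact hl)]
        have hget : PySem.List.pyGetD (pvAdoptStep ordering w j par x) x none = some j := by
          rw [hstep, PySem.List.pyGetD_eq_getElem _ none h0 (by simpa using hl)]
          rw [List.getElem_set_self]
        rw [hget]
        rw [if_neg (fun h => hxt h.1), if_pos ⟨List.mem_cons_self .., hc⟩]
      · have hstep : pvAdoptStep ordering w j par x = par := by
          unfold pvAdoptStep; rw [if_neg hc]
        rw [hstep, ih (List.nodup_cons.mp hnd).2 (fun i hi => hpos i (List.mem_cons_of_mem _ hi)) _ x h0 hl]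
        by_cases hxt' : x ∈ t ∧ x < j ∧ PySem.List.pyGetD par x none = none ∧ w ≠ PySem.List.pyGetD ordering x 0
        · exact absurd hxt'.2 hc
        · rw [if_neg hxt', if_neg (fun h => hc h.2)]
    · have hi0 : 0 ≤ i := hpos i (List.mem_cons_self ..)
      have hget : PySem.List.pyGetD (pvAdoptStep ordering w j par i) x none = PySem.List.pyGetD par x none := by
        unfold pvAdoptStep
        split
        · rw [PySem.List.pyGetD_eq_getElem _ none h0 (by simpa using hl),
              PySem.List.pyGetD_eq_getElem _ none h0 (by exact_mod_cast hl)]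
          rw [List.getElem_set_ne (by omega)]
        · rfl
      rw [ih (List.nodup_cons.mp hnd).2 (fun i hi => hpos i (List.mem_cons_of_mem _ hi)) _ x h0 (by rw [hlen']; exact hl), hget]
      have hmem : (x ∈ i :: t) ↔ (x ∈ t) := by simp [hxi]
      by_cases ht : x ∈ t ∧ x < j ∧ PySem.List.pyGetD par x none = none ∧ w ≠ PySem.List.pyGetD ordering x 0
      · rw [if_pos ht, if_pos ⟨hmem.mpr ht.1, ht.2⟩]
      · rw [if_neg ht, if_neg (fun h => ht ⟨hmem.mp h.1, h.2⟩)]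

-- the invariant: after sweeping positions [0, J), parent[x] is the first hit in (x, J)
theorem pv_sweep_inv (ordering : List Int) (bags : List (List Int)) : ∀ (J : Nat), J ≤ ordering.length →
    ∀ x : Int, 0 ≤ x → x < (bags.length : Int) →
      PySem.List.pyGetD
          ((PySem.List.pyRange 0 ((J : Nat) : Int) 1).foldl
            (pvSweepB ordering (pvElimBag ordering) (pvHolders bags))
            (List.replicate bags.length (none : Option Int))) x none
        = (PySem.List.pyRange (x + 1) ((J : Nat) : Int) 1).find?
            (pvScanPred (pvElimBag ordering) (PySem.Set.ofList (PySem.List.pyGetD bags x []))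
              (PySem.List.pyGetD ordering x 0) ordering) := by
  intro J
  induction J with
  | zero =>
    intro _ x h0 hx
    rw [show (((0 : Nat) : Int)) = (0 : Int) from rfl,
        PySem.List.pyRange_one_eq_nil (le_refl 0), PySem.List.pyRange_one_eq_nil (by omega)]
    simp only [List.foldl_nil, List.find?_nil]
    rw [PySem.List.pyGetD_eq_getElem _ none h0 (by simpa using hx)]
    exact List.getElem_replicate _
  | succ J ih =>
    intro hJ1 x h0 hx
    have hJ : J ≤ ordering.length := by omega
    have hcast : (((J + 1 : Nat)) : Int) = ((J : Nat) : Int) + 1 := by push_cast; ring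
    rw [hcast, PySem.List.pyRange_one_succ_right (by positivity), List.foldl_append]
    simp only [List.foldl_cons, List.foldl_nil]
    set parJ := (PySem.List.pyRange 0 ((J : Nat) : Int) 1).foldl
      (pvSweepB ordering (pvElimBag ordering) (pvHolders bags))
      (List.replicate bags.length (none : Option Int)) with hparJ
    have hlenJ : parJ.length = bags.length := by
      rw [hparJ, pv_sweepfold_length]; simp
    have hIH := ih hJ x h0 hx
    by_cases hxJ : x < ((J : Nat) : Int)
    · rw [PySem.List.pyRange_one_succ_right (by omega), List.find?_append]
      unfold pvSweepB
      by_cases hb : ((pvElimBag ordering).get? (PySem.List.pyGetD ordering ((J : Nat) : Int) 0)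
          == some ((J : Nat) : Int)) = true
      · rw [if_pos hb,
            pv_adoptfold_getD ordering _ _ _ (pv_nodup_holders bags _)
              (fun i hi => ((pv_mem_holders bags _ i).mp hi).1) parJ x h0 (by omega)]
        rcases hpre : (PySem.List.pyRange (x + 1) ((J : Nat) : Int) 1).find?
            (pvScanPred (pvElimBag ordering) (PySem.Set.ofList (PySem.List.pyGetD bags x []))
              (PySem.List.pyGetD ordering x 0) ordering) with _ | v
        · rw [hIH, hpre, Option.none_or]
          rcases hP : pvScanPred (pvElimBag ordering) (PySem.Set.ofList (PySem.List.pyGetD bags x []))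
              (PySem.List.pyGetD ordering x 0) ordering ((J : Nat) : Int) with _ | _
          · rw [List.find?_cons_of_neg (by rw [hP]; exact Bool.false_ne_true), List.find?_nil]
            rw [if_neg]
            rintro ⟨hm, _, _, hno⟩
            have hmem := (pv_mem_holders bags _ x).mp hm
            have hP' : pvScanPred (pvElimBag ordering) (PySem.Set.ofList (PySem.List.pyGetD bags x []))
                (PySem.List.pyGetD ordering x 0) ordering ((J : Nat) : Int) = true := by
              unfold pvScanPred
              simp only [hb, Bool.true_and, Bool.and_eq_true, bne_iff_ne]
              exact ⟨(PySem.Set.contains_iff _ _).mpr ((PySem.Set.mem_ofList _ _).mpr hmem.2.2), hno⟩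
            rw [hP] at hP'
            exact Bool.noConfusion hP'
          · rw [List.find?_cons_of_pos hP]
            have hP' := hP
            unfold pvScanPred at hP'
            simp only [hb, Bool.true_and, Bool.and_eq_true, bne_iff_ne] at hP'
            rw [if_pos]
            exact ⟨(pv_mem_holders bags _ x).mpr
                ⟨h0, hx, (PySem.Set.mem_ofList _ _).mp ((PySem.Set.contains_iff _ _).mp hP'.1)⟩,
              hxJ, rfl, hP'.2⟩
        · rw [hIH, hpre, Option.some_or]
          rw [if_neg (by rintro ⟨_, _, hnone, _⟩; cases hnone)]
      · rw [if_neg hb, hIH]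
        have hb' : ((pvElimBag ordering).get? (PySem.List.pyGetD ordering ((J : Nat) : Int) 0)
            == some ((J : Nat) : Int)) = false := by
          revert hb
          cases ((pvElimBag ordering).get? (PySem.List.pyGetD ordering ((J : Nat) : Int) 0)
            == some ((J : Nat) : Int)) <;> simp
        have hPf : pvScanPred (pvElimBag ordering) (PySem.Set.ofList (PySem.List.pyGetD bags x []))
            (PySem.List.pyGetD ordering x 0) ordering ((J : Nat) : Int) = false := by
          unfold pvScanPred
          simp only [hb', Bool.false_and]
        rw [List.find?_cons_of_neg (by rw [hPf]; exact Bool.false_ne_true), List.find?_nil,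
            Option.or_none]
    · have hnil1 : PySem.List.pyRange (x + 1) (((J : Nat) : Int) + 1) 1 = [] :=
        PySem.List.pyRange_one_eq_nil (by omega)
      have hnil2 : PySem.List.pyRange (x + 1) ((J : Nat) : Int) 1 = [] :=
        PySem.List.pyRange_one_eq_nil (by omega)
      rw [hnil1]
      simp only [List.find?_nil]
      rw [hnil2] at hIH
      simp only [List.find?_nil] at hIH
      unfold pvSweepB
      split
      · rw [pv_adoptfold_getD ordering _ _ _ (pv_nodup_holders bags _)
              (fun i hi => ((pv_mem_holders bags _ i).mp hi).1) parJ x h0 (by omega), hIH]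
        rw [if_neg (by rintro ⟨_, hlt, _⟩; omega)]
      · exact hIH

theorem pv_B_norm (ordering : List Int) (bags : List (List Int)) :
    build_elimination_tree_alt ordering bags =
      (((PySem.List.pyRange 0 ((bags.length : Int)) 1).foldl
          (pvSweepStep ordering bags ((bags.length : Int) - 1))
          ((PySem.List.pyRange 0 ((bags.length : Int)) 1).foldl (pvBuildStep ordering bags) PySem.Dict.empty)).items,
        (bags.length : Int) - 1) := by
  simp only [build_elimination_tree_alt]
  have hpar : ∀ x : Int, 0 ≤ x → x < (bags.length : Int) →
      PySem.List.pyGetD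
          ((PySem.List.pyRange 0 ((ordering.length : Int)) 1).foldl
            (pvSweepB ordering (pvElimBag ordering) (pvHolders bags))
            (List.replicate bags.length (none : Option Int))) x none
        = pvParent ordering bags x := by
    intro x h0 hx
    rw [pv_sweep_inv ordering bags ordering.length (le_refl _) x h0 hx, pv_scan_eq_parent]
  have h1 : (PySem.List.pyRange 0 ((bags.length : Int)) 1).foldl
      (fun ch i => match PySem.List.pyGetD
          ((PySem.List.pyRange 0 ((ordering.length : Int)) 1).foldl
            (pvSweepB ordering (pvElimBag ordering) (pvHolders bags))
            (List.replicate bags.length (none : Option Int))) i none with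
        | some q => PySem.Dict.modify ch q [] (· ++ [i])
        | none => ch) PySem.Dict.empty
      = (PySem.List.pyRange 0 ((bags.length : Int)) 1).foldl (pvBuildStep ordering bags) PySem.Dict.empty := by
    apply PySem.List.foldl_congr_mem
    intro ch i hi
    obtain ⟨hi0, hin⟩ := PySem.List.mem_pyRange_one.mp hi
    rw [hpar i hi0 hin]
    rfl
  rw [h1]
  apply congrArg (fun d => (PySem.Dict.items d, (bags.length : Int) - 1))
  apply PySem.List.foldl_congr_mem
  intro ch i hi
  obtain ⟨hi0, hin⟩ := PySem.List.mem_pyRange_one.mp hi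
  rw [hpar i hi0 hin]
  unfold pvSweepStep
  rcases pvParent ordering bags i with _ | q
  · by_cases hir : i = (bags.length : Int) - 1 <;> simp [hir]
  · simp


-- ===== VERDICT (by name: the statement is the Claim_ definition above) =====
theorem build_elimination_tree_spec : Claim_equal_build_elimination_tree := by
  intro ordering bags _ _
  unfold Spec_build_elimination_tree
  rw [pv_A_norm, pv_B_norm]
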